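-- pv_equiv track=rewrite | github.com/AleMolero/py_practica_2 | TaTeTi.py | generar_linea
-- ===== SOURCE A (Python) =====
-- def generar_linea(interseccion, medio):
--     linea = []
--     for i in range(3):
--         linea.append(interseccion)
--         for j in range(7):
--             linea.append(medio)
--     linea.append(interseccion)
--     return linea
-- ===== SOURCE B (Python) =====
-- def generar_linea(interseccion, medio):
--     # positional rule: the line has 25 cells; cell k holds interseccion iff k % 8 == 0
--     return [interseccion if k % 8 == 0 else medio for k in range(25)]
-- ===== Notes on version B (the rewrite author's own statement) =====
-- stated objective: alternative
-- what changed: B builds nothing by appending blocks: it derives each of the 25 cells directly from its index by the positional rule 'cell k is interseccion iff k % 8 == 0', a single map over range(25) instead of A's nested counting loops with an accumulator.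
import Mathlib
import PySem

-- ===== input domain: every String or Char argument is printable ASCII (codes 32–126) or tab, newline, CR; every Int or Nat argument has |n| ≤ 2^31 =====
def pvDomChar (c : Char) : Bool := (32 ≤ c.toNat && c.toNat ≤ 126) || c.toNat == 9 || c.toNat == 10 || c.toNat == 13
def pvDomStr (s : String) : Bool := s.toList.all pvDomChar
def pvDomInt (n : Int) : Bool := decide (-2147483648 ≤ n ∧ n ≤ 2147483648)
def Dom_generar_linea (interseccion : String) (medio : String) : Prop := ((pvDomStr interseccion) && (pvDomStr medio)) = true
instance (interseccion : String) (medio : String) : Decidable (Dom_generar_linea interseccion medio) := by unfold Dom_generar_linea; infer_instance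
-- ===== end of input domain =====

-- B derives each cell from its index (interseccion iff k % 8 == 0, k in range(25)) instead of A's nested append loops (objective: alternative).


-- ===== PORT A =====
-- literal transliteration: outer loop over range(3), inner loop over range(7), appending to an accumulator
def generar_linea (interseccion : String) (medio : String) : List String :=
  let linea : List String := []
  let linea := (PySem.List.pyRange 0 3 1).foldl (fun linea _i =>
    let linea := linea ++ [interseccion]
    (PySem.List.pyRange 0 7 1).foldl (fun linea _j => linea ++ [medio]) linea) linea
  linea ++ [interseccion]

-- ===== PORT B =====
-- each cell computed from its index: interseccion iff k % 8 == 0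
-- (range(25) and k % 8 ported over Nat: exact here since all indices are non-negative)
def generar_linea_alt (interseccion : String) (medio : String) : List String :=
  (List.range 25).map (fun k => if k % 8 == 0 then interseccion else medio)

-- ===== PRECONDITION & SPEC =====
def Spec_generar_linea (interseccion : String) (medio : String) (out : List String) : Prop := out = generar_linea_alt interseccion medio
instance (interseccion : String) (medio : String) (out : List String) : Decidable (Spec_generar_linea interseccion medio out) := by unfold Spec_generar_linea; infer_instance

-- ===== CLAIM (what is proved, stated in full; the proofs are below) =====
def Claim_equal_generar_linea : Prop := ∀ (interseccion : String) (medio : String), Dom_generar_linea interseccion medio → Spec_generar_linea interseccion medio (generar_linea interseccion medio)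

-- ===== LEMMAS AND PROOFS =====

-- ===== VERDICT (by name: the statement is the Claim_ definition above) =====
theorem generar_linea_spec : Claim_equal_generar_linea := by
  intro i m _
  show _ = _
  have h3 : PySem.List.pyRange 0 3 1 = [0, 1, 2] := by decide
  have h7 : PySem.List.pyRange 0 7 1 = [0, 1, 2, 3, 4, 5, 6] := by decide
  have hB : generar_linea_alt i m =
      [i, m, m, m, m, m, m, m, i, m, m, m, m, m, m, m, i, m, m, m, m, m, m, m, i] := rfl
  rw [hB]
  simp [generar_linea, h3, h7]
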